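-- pv_equiv track=rewrite | github.com/1r00t/qr-gen | utils/pattern_mask.py | _get_alignment_positions
-- ===== SOURCE A (Python) =====
-- from itertools import product
--
-- def _is_alignment_within_finder(pos, qr_size):
--     x, y = pos
--     finder_positions = [(0, 0), (0, qr_size - 7), (qr_size - 7, 0)]
--     alignment_size = 5
--
--     for fp_x, fp_y in finder_positions:
--         if any(
--             (x + i, y + j)
--             in [(fp_x + dx, fp_y + dy) for dx in range(7) for dy in range(7)]
--             for i in range(alignment_size)
--             for j in range(alignment_size)
--         ):
--             return False
--
--     return True
--
-- def _get_alignment_positions(version):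
--     positions = []
--     if version > 1:
--         n_patterns = version // 7 + 2
--         first_pos = 6
--         positions.append(first_pos)
--         matrix_width = 17 + 4 * version
--         last_pos = matrix_width - 1 - first_pos
--         second_last_pos = (
--             (first_pos + last_pos * (n_patterns - 2) + (n_patterns - 1) // 2)
--             // (n_patterns - 1)
--         ) & -2
--         pos_step = last_pos - second_last_pos
--         second_pos = last_pos - (n_patterns - 2) * pos_step
--         positions.extend(range(second_pos, last_pos + 1, pos_step))
--     positions = list(product(positions, repeat=2))
--     positions_clean = []
--     for position in positions:
--         if _is_alignment_within_finder(position, matrix_width):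
--             positions_clean.append(position)
--     return positions_clean
-- ===== SOURCE B (Python) =====
-- def _get_alignment_positions(version):
--     if version <= 1:
--         return []
--     n_patterns = version // 7 + 2
--     width = 17 + 4 * version
--     last_pos = width - 7
--     second_last_pos = (6 + last_pos * (n_patterns - 2) + (n_patterns - 1) // 2) // (n_patterns - 1) // 2 * 2
--     pos_step = last_pos - second_last_pos
--     second_pos = last_pos - (n_patterns - 2) * pos_step
--     centers = [6] + list(range(second_pos, last_pos + 1, pos_step))
--     finders = [(0, 0), (0, width - 7), (width - 7, 0)]
--     # closed-form rectangle overlap instead of brute-force cell membership: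
--     # the 5x5 block at (x, y) misses the 7x7 block at (fx, fy) iff the intervals are disjoint
--     return [
--         (x, y)
--         for x in centers
--         for y in centers
--         if all(x > fx + 6 or fx > x + 4 or y > fy + 6 or fy > y + 4 for fx, fy in finders)
--     ]
-- ===== Notes on version B (the rewrite author's own statement) =====
-- stated objective: faster
-- what changed: The 5x5-alignment-cell vs 7x7-finder-cell brute-force membership test (25 candidate cells each searched in a freshly built 49-cell list per finder) is replaced by a closed-form integer rectangle-overlap test per finder corner, and the build-then-filter pair loop becomes a single comprehension over the centers.
import Mathlib
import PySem

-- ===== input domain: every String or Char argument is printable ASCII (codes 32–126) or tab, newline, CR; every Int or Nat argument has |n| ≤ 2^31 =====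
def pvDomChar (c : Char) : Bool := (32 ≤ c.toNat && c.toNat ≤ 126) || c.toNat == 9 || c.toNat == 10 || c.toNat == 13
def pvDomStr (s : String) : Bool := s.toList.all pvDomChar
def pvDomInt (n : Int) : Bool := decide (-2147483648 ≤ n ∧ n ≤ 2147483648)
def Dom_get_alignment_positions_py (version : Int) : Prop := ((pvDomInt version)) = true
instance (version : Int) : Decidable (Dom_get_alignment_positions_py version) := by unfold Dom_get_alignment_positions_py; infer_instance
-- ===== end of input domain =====

-- B replaces A's brute-force 5x5-vs-49-cell membership test with a closed-form
-- rectangle-overlap check per finder corner (objective: faster, constant-factor).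


-- ===== PORT A =====
-- [(fp_x + dx, fp_y + dy) for dx in range(7) for dy in range(7)]
def pvFinderCells (fx fy : Int) : List (Int × Int) :=
  (PySem.List.pyRange 0 7 1).flatMap (fun dx =>
    (PySem.List.pyRange 0 7 1).map (fun dy => (fx + dx, fy + dy)))

-- any((x+i, y+j) in cells for i in range(5) for j in range(5))
def pvAnyHit (x y fx fy : Int) : Bool :=
  (PySem.List.pyRange 0 5 1).any (fun i =>
    (PySem.List.pyRange 0 5 1).any (fun j =>
      (pvFinderCells fx fy).contains (x + i, y + j)))

-- the for-loop over finder_positions with its early 'return False'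
def pvIsAlignGo (x y : Int) : List (Int × Int) → Bool
  | [] => true
  | f :: rest => if pvAnyHit x y f.1 f.2 then false else pvIsAlignGo x y rest

def pvIsAlignmentWithinFinder (pos : Int × Int) (qr_size : Int) : Bool :=
  pvIsAlignGo pos.1 pos.2 [(0, 0), (0, qr_size - 7), (qr_size - 7, 0)]

-- In Python, matrix_width is assigned only inside 'if version > 1'; when version <= 1 the
-- filtering loop runs zero times and matrix_width is never read, so the whole computation
-- lives inside the branch here.  '& -2' is PySem.Int.band, Python-exact on negatives.
def get_alignment_positions_py (version : Int) : List (Int × Int) :=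
  if version > 1 then
    let n_patterns := PySem.Int.floordiv version 7 + 2
    let first_pos : Int := 6
    let matrix_width := 17 + 4 * version
    let last_pos := matrix_width - 1 - first_pos
    let second_last_pos := PySem.Int.band
      (PySem.Int.floordiv (first_pos + last_pos * (n_patterns - 2) + PySem.Int.floordiv (n_patterns - 1) 2) (n_patterns - 1)) (-2)
    let pos_step := last_pos - second_last_pos
    let second_pos := last_pos - (n_patterns - 2) * pos_step
    let positions := [first_pos] ++ PySem.List.pyRange second_pos (last_pos + 1) pos_step
    -- list(product(positions, repeat=2))
    let pairs := positions.flatMap (fun a => positions.map (fun b => (a, b)))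
    pairs.foldl (fun acc p => if pvIsAlignmentWithinFinder p matrix_width then acc ++ [p] else acc) []
  else []

-- ===== PORT B =====
def pvNoOverlap (x y : Int) (f : Int × Int) : Bool :=
  decide (x > f.1 + 6) || decide (f.1 > x + 4) || decide (y > f.2 + 6) || decide (f.2 > y + 4)

def get_alignment_positions_py_alt (version : Int) : List (Int × Int) :=
  if version ≤ 1 then [] else
    let n_patterns := PySem.Int.floordiv version 7 + 2
    let width := 17 + 4 * version
    let last_pos := width - 7
    let second_last_pos := PySem.Int.floordiv
      (PySem.Int.floordiv (6 + last_pos * (n_patterns - 2) + PySem.Int.floordiv (n_patterns - 1) 2) (n_patterns - 1)) 2 * 2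
    let pos_step := last_pos - second_last_pos
    let second_pos := last_pos - (n_patterns - 2) * pos_step
    let centers := 6 :: PySem.List.pyRange second_pos (last_pos + 1) pos_step
    let finders : List (Int × Int) := [(0, 0), (0, width - 7), (width - 7, 0)]
    centers.flatMap (fun x =>
      (centers.filter (fun y => finders.all (fun f => pvNoOverlap x y f))).map (fun y => (x, y)))

-- ===== PRECONDITION & SPEC =====
def Spec_get_alignment_positions_py (version : Int) (out : List (Int × Int)) : Prop := out = get_alignment_positions_py_alt version
instance (version : Int) (out : List (Int × Int)) : Decidable (Spec_get_alignment_positions_py version out) := by unfold Spec_get_alignment_positions_py; infer_instance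

-- ===== CLAIM (what is proved, stated in full; the proofs are below) =====
def Claim_equal_get_alignment_positions_py : Prop := ∀ (version : Int), Dom_get_alignment_positions_py version → Spec_get_alignment_positions_py version (get_alignment_positions_py version)

-- ===== LEMMAS AND PROOFS =====

-- m & -2 clears the low bit, i.e. floors to an even number
lemma pv_lor_one (k : Nat) : k ||| 1 = 2 * (k / 2) + 1 := by
  conv_lhs => rw [← Nat.bit_testBit_zero_shiftRight_one k,
    show (1 : Nat) = Nat.bit true 0 from rfl, Nat.lor_bit]
  simp [Nat.bit, Nat.shiftRight_one]

lemma pv_band_neg_two (m : Int) : PySem.Int.band m (-2) = PySem.Int.floordiv m 2 * 2 := by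
  rw [PySem.Int.floordiv_eq_ediv_of_pos (by norm_num)]
  have h2 : ¬ (0 : Int) ≤ -2 := by norm_num
  have h1 : ((- -2 : Int) - 1).toNat = 1 := rfl
  by_cases h : 0 ≤ m
  · simp only [PySem.Int.band, if_pos h, if_neg h2, h1, Nat.and_one_is_mod]
    omega
  · simp only [PySem.Int.band, if_neg h, if_neg h2, h1, pv_lor_one]
    omega

-- the brute-force cell-membership test holds exactly when the two blocks overlap
lemma pv_anyHit_iff (x y fx fy : Int) :
    pvAnyHit x y fx fy = true ↔ (x ≤ fx + 6 ∧ fx ≤ x + 4 ∧ y ≤ fy + 6 ∧ fy ≤ y + 4) := by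
  simp only [pvAnyHit, pvFinderCells, List.any_eq_true, PySem.List.mem_pyRange_one,
    List.contains_iff_mem, List.mem_flatMap, List.mem_map, Prod.mk.injEq]
  constructor
  · rintro ⟨i, hi, j, hj, dx, hdx, dy, hdy, h1, h2⟩
    omega
  · rintro ⟨h1, h2, h3, h4⟩
    exact ⟨max 0 (fx - x), by omega, max 0 (fy - y), by omega,
      x + max 0 (fx - x) - fx, by omega,
      y + max 0 (fy - y) - fy, by omega, by omega, by omega⟩

lemma pv_noOverlap_eq (x y fx fy : Int) :
    pvNoOverlap x y (fx, fy) = !pvAnyHit x y fx fy := by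
  have h := pv_anyHit_iff x y fx fy
  cases hb : pvAnyHit x y fx fy <;> rw [hb] at h <;> simp at h <;> simp [pvNoOverlap] <;> omega

lemma pv_isAlignGo_eq_all (x y : Int) (l : List (Int × Int)) :
    pvIsAlignGo x y l = l.all (fun f => pvNoOverlap x y f) := by
  induction l with
  | nil => rfl
  | cons f rest ih =>
    obtain ⟨fx, fy⟩ := f
    simp only [pvIsAlignGo, List.all_cons, ih, pv_noOverlap_eq]
    cases pvAnyHit x y fx fy <;> simp

lemma pv_main_shape (P : List Int) (w : Int) :
    (P.flatMap (fun a => P.map (fun b => (a, b)))).foldl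
      (fun acc p => if pvIsAlignmentWithinFinder p w then acc ++ [p] else acc) []
    = P.flatMap (fun x =>
        (P.filter (fun y => ([(0, 0), (0, w - 7), (w - 7, 0)] : List (Int × Int)).all
          (fun f => pvNoOverlap x y f))).map (fun y => (x, y))) := by
  rw [PySem.List.foldl_append_if, List.filter_flatMap]
  simp only [List.nil_append, List.map_id']
  refine List.flatMap_congr ?_
  intro a _
  rw [List.filter_map]
  congr 1
  apply List.filter_congr
  intro y _
  simp only [Function.comp_apply, pvIsAlignmentWithinFinder, pv_isAlignGo_eq_all]

-- ===== VERDICT (by name: the statement is the Claim_ definition above) =====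
theorem get_alignment_positions_py_spec : Claim_equal_get_alignment_positions_py := by
  intro version _
  unfold Spec_get_alignment_positions_py
  by_cases hv : version > 1
  · simp only [get_alignment_positions_py, get_alignment_positions_py_alt, if_pos hv,
      if_neg (by omega : ¬ version ≤ 1)]
    rw [pv_band_neg_two,
      show (17 + 4 * version - 1 - 6 : Int) = 17 + 4 * version - 7 by ring,
      List.singleton_append, pv_main_shape]
  · simp [get_alignment_positions_py, get_alignment_positions_py_alt, hv,
      (by omega : version ≤ 1)]
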